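-- pv_equiv track=rewrite | github.com/miguelglez8/chess | Partida.py | contarPuntuacion
-- ===== SOURCE A (Python) =====
-- def contarPuntuacion(tablero,equipo):
--     """función que recibe el tablero con las fichas  y el nombre del
--     equipo que queremos saber el valor de las fichas y devuelve la suma del valor
--     de dicho equipo (sin el valor del rey)"""
--     fichas_negro=["PN","TN","CN","AN","DN"]
--     fichas_blanco=["PB","TB","CB","AB","DB"]
--     count=0
--     if equipo == "EQUIPO NEGRO" or equipo == "EN": # elegimos el equipo negro
--         for i in range(len(tablero)):
--             for j in range(len(tablero[i])): # si encontramos alguna ficha que pertenezca al equipo negro, añadimos su vcalor a la variable count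
--                 if tablero[i][j] == fichas_negro[0]:
--                     count=count+1 # valor del peón
--                 elif tablero[i][j] == fichas_negro[1]:
--                     count=count+5 # valor de la torre
--                 elif tablero[i][j] == fichas_negro[2]:
--                     count=count+3 # valor del caballo
--                 elif tablero[i][j] == fichas_negro[3]:
--                     count=count+3 # valor del alfíl
--                 elif tablero[i][j] == fichas_negro[4]:
--                     count=count+9 # valor de la dama
--     elif equipo == "EQUIPO BLANCO" or equipo == "EB": # elegimos el equipo blanco
--         for i in range(len(tablero)):
--             for j in range(len(tablero[i])): # si encontramos alguna ficha que pertenezca al equipo blanco, añadimos su vcalor a la variable count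
--                 if tablero[i][j] == fichas_blanco[0]:
--                     count=count+1 # valor del peón
--                 elif tablero[i][j] == fichas_blanco[1]:
--                     count=count+5 # valor de la torre
--                 elif tablero[i][j] == fichas_blanco[2]:
--                     count=count+3 # valor del caballo
--                 elif tablero[i][j] == fichas_blanco[3]:
--                     count=count+3 # valor del alfíl
--                 elif tablero[i][j] == fichas_blanco[4]:
--                     count=count+9 # valor de la dama
--     return count # devuelve el valor de las fichas del equipo indicado
-- ===== SOURCE B (Python) =====
-- from collections import Counter
--
-- def contarPuntuacion(tablero, equipo):
--     counts = Counter(cell for row in tablero for cell in row)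
--     if equipo in ("EQUIPO NEGRO", "EN"):
--         return counts["PN"] + 5*counts["TN"] + 3*counts["CN"] + 3*counts["AN"] + 9*counts["DN"]
--     if equipo in ("EQUIPO BLANCO", "EB"):
--         return counts["PB"] + 5*counts["TB"] + 3*counts["CB"] + 3*counts["AB"] + 9*counts["DB"]
--     return 0
-- ===== Notes on version B (the rewrite author's own statement) =====
-- stated objective: alternative
-- what changed: Replaces the per-cell nested if-chain accumulation with a single Counter tally over all cells followed by a fixed 5-term weighted sum of the chosen team's piece codes.
import Mathlib
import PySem

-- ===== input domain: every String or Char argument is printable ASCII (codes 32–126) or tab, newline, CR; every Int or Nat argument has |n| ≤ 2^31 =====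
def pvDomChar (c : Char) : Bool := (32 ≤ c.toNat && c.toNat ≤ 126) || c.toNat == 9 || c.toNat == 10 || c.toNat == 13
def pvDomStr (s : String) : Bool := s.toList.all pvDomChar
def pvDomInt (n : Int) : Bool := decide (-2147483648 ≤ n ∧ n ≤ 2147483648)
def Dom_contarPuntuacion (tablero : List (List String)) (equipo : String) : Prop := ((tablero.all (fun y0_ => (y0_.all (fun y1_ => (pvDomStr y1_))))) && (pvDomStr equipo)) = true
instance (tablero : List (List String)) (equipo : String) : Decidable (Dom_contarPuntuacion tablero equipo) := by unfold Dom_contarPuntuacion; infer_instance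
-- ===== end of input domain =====

-- B replaces A's per-cell if-chain accumulation by one Counter tally plus a fixed weighted sum (alternative decomposition, same cost).

-- ===== PORT A =====
-- A's inner if/elif chain on one cell, for the black team (literal branch order)
def pvStepNegro (count : Int) (c : String) : Int :=
  if c = "PN" then count + 1
  else if c = "TN" then count + 5
  else if c = "CN" then count + 3
  else if c = "AN" then count + 3
  else if c = "DN" then count + 9
  else count

-- A's inner if/elif chain on one cell, for the white team
def pvStepBlanco (count : Int) (c : String) : Int :=
  if c = "PB" then count + 1
  else if c = "TB" then count + 5
  else if c = "CB" then count + 3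
  else if c = "AB" then count + 3
  else if c = "DB" then count + 9
  else count

def contarPuntuacion (tablero : List (List String)) (equipo : String) : Int :=
  let count : Int := 0
  if equipo = "EQUIPO NEGRO" ∨ equipo = "EN" then
    (PySem.List.pyRange 0 (tablero.length : Int) 1).foldl (fun count i =>
      (PySem.List.pyRange 0 ((PySem.List.pyGetD tablero i []).length : Int) 1).foldl (fun count j =>
        pvStepNegro count (PySem.List.pyGetD (PySem.List.pyGetD tablero i []) j "")) count) count
  else if equipo = "EQUIPO BLANCO" ∨ equipo = "EB" then
    (PySem.List.pyRange 0 (tablero.length : Int) 1).foldl (fun count i =>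
      (PySem.List.pyRange 0 ((PySem.List.pyGetD tablero i []).length : Int) 1).foldl (fun count j =>
        pvStepBlanco count (PySem.List.pyGetD (PySem.List.pyGetD tablero i []) j "")) count) count
  else count

-- ===== PORT B =====
def contarPuntuacion_alt (tablero : List (List String)) (equipo : String) : Int :=
  let counts := PySem.Dict.counter (tablero.flatMap (fun row => row))
  if equipo = "EQUIPO NEGRO" ∨ equipo = "EN" then
    counts.getD "PN" 0 + 5 * counts.getD "TN" 0 + 3 * counts.getD "CN" 0
      + 3 * counts.getD "AN" 0 + 9 * counts.getD "DN" 0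
  else if equipo = "EQUIPO BLANCO" ∨ equipo = "EB" then
    counts.getD "PB" 0 + 5 * counts.getD "TB" 0 + 3 * counts.getD "CB" 0
      + 3 * counts.getD "AB" 0 + 9 * counts.getD "DB" 0
  else 0

-- ===== PRECONDITION & SPEC =====
def Spec_contarPuntuacion (tablero : List (List String)) (equipo : String) (out : Int) : Prop := out = contarPuntuacion_alt tablero equipo
instance (tablero : List (List String)) (equipo : String) (out : Int) : Decidable (Spec_contarPuntuacion tablero equipo out) := by unfold Spec_contarPuntuacion; infer_instance

-- ===== CLAIM (what is proved, stated in full; the proofs are below) =====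
def Claim_equal_contarPuntuacion : Prop := ∀ (tablero : List (List String)) (equipo : String), Dom_contarPuntuacion tablero equipo → Spec_contarPuntuacion tablero equipo (contarPuntuacion tablero equipo)

-- ===== LEMMAS AND PROOFS =====

lemma foldl_stepNegro (l : List String) (c0 : Int) :
    l.foldl pvStepNegro c0 =
      c0 + (l.count "PN" : Int) + 5 * (l.count "TN" : Int) + 3 * (l.count "CN" : Int)
        + 3 * (l.count "AN" : Int) + 9 * (l.count "DN" : Int) := by
  induction l generalizing c0 with
  | nil => simp
  | cons x t ih =>
    simp only [List.foldl_cons, ih, List.count_cons]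
    unfold pvStepNegro
    split_ifs <;> subst_vars <;> simp_all <;> ring

lemma foldl_stepBlanco (l : List String) (c0 : Int) :
    l.foldl pvStepBlanco c0 =
      c0 + (l.count "PB" : Int) + 5 * (l.count "TB" : Int) + 3 * (l.count "CB" : Int)
        + 3 * (l.count "AB" : Int) + 9 * (l.count "DB" : Int) := by
  induction l generalizing c0 with
  | nil => simp
  | cons x t ih =>
    simp only [List.foldl_cons, ih, List.count_cons]
    unfold pvStepBlanco
    split_ifs <;> subst_vars <;> simp_all <;> ring

lemma nested_fold_eq_flat (tablero : List (List String)) (f : Int → String → Int) :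
    (PySem.List.pyRange 0 (tablero.length : Int) 1).foldl (fun count i =>
      (PySem.List.pyRange 0 ((PySem.List.pyGetD tablero i []).length : Int) 1).foldl (fun count j =>
        f count (PySem.List.pyGetD (PySem.List.pyGetD tablero i []) j "")) count) 0
    = (tablero.flatMap (fun row => row)).foldl f 0 := by
  rw [PySem.List.foldl_pyRange_zero_pyGetD' tablero []
    (fun count row =>
      (PySem.List.pyRange 0 (row.length : Int) 1).foldl (fun count j =>
        f count (PySem.List.pyGetD row j "")) count) 0]
  have : ∀ (row : List String) (c : Int),
      (PySem.List.pyRange 0 (row.length : Int) 1).foldl (fun count j =>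
        f count (PySem.List.pyGetD row j "")) c = row.foldl f c := by
    intro row c
    exact PySem.List.foldl_pyRange_zero_pyGetD' row "" f c
  simp only [this]
  rw [List.flatMap_def, List.map_id', ← List.foldl_flatten]

-- ===== VERDICT (by name: the statement is the Claim_ definition above) =====
theorem contarPuntuacion_spec : Claim_equal_contarPuntuacion := by
  intro tablero equipo _
  unfold Spec_contarPuntuacion contarPuntuacion contarPuntuacion_alt
  split_ifs with h1 h2 <;>
    simp [nested_fold_eq_flat, foldl_stepNegro, foldl_stepBlanco, PySem.Dict.getD_counter]
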